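-- pv_equiv track=rewrite | github.com/pytorch/pytorch | tools/experimental/torchfuzz/operators/nn_functional.py | _calculate_stride
-- ===== SOURCE A (Python) =====
-- def _calculate_stride(size):
--     """Calculate stride for a given size."""
--     if not size:
--         return ()
--     stride = []
--     current_stride = 1
--     for dim_size in reversed(size):
--         stride.append(current_stride)
--         current_stride *= dim_size
--     return tuple(reversed(stride))
-- ===== SOURCE B (Python) =====
-- import math
--
-- def _calculate_stride(size):
--     """Calculate stride for a given size."""
--     if not size:
--         return ()
--     return tuple(math.prod(size[i + 1:]) for i in range(len(size)))
-- ===== Notes on version B (the rewrite author's own statement) =====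
-- stated objective: simpler
-- what changed: Replaces the reverse pass with a running accumulator by computing each stride independently as math.prod of the suffix size[i+1:].
import Mathlib
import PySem

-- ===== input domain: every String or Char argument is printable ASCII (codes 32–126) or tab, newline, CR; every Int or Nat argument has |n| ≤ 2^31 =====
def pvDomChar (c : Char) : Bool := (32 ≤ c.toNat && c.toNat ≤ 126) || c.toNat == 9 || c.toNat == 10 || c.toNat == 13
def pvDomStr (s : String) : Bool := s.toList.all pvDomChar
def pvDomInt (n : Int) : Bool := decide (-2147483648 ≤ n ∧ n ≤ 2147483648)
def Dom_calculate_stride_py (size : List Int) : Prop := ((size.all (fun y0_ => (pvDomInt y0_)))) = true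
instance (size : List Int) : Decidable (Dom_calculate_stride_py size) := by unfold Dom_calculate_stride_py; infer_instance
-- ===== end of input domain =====

-- B replaces A's single reverse pass with a running accumulator by computing each
-- stride independently as the product of the suffix size[i+1:] (objective: simpler).

-- ===== PORT A =====
-- one reverse pass: append current_stride, multiply it by dim_size; then reverse
def calculate_stride_py (size : List Int) : List Int :=
  if size = [] then []
  else
    let r := size.reverse.foldl
      (fun (st : List Int × Int) dim_size => (st.1 ++ [st.2], st.2 * dim_size))
      ([], 1)
    r.1.reverse

-- ===== PORT B =====
-- math.prod(size[i+1:]) for i in range(len(size)); size[i+1:] with i+1 ≥ 0 is drop (i+1) (exact)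
def calculate_stride_py_alt (size : List Int) : List Int :=
  if size = [] then []
  else (List.range size.length).map
    (fun i => (size.drop (i + 1)).foldl (fun a b => a * b) 1)

-- ===== PRECONDITION & SPEC =====
def Spec_calculate_stride_py (size : List Int) (out : List Int) : Prop := out = calculate_stride_py_alt size
instance (size : List Int) (out : List Int) : Decidable (Spec_calculate_stride_py size out) := by unfold Spec_calculate_stride_py; infer_instance

-- ===== CLAIM (what is proved, stated in full; the proofs are below) =====
def Claim_equal_calculate_stride_py : Prop := ∀ (size : List Int), Dom_calculate_stride_py size → Spec_calculate_stride_py size (calculate_stride_py size)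

-- ===== LEMMAS AND PROOFS =====

-- unguarded B body
def pvStrides (l : List Int) : List Int :=
  (List.range l.length).map (fun i => (l.drop (i + 1)).foldl (fun a b => a * b) 1)

theorem pvStrides_cons (a : Int) (l : List Int) :
    pvStrides (a :: l) = (l.foldl (fun a b => a * b) 1) :: pvStrides l := by
  simp [pvStrides, List.range_succ_eq_map, List.map_map, Function.comp]

theorem pvFoldl_mul_eq_prod (l : List Int) (c : Int) :
    l.foldl (fun a b => a * b) c = c * l.prod := by
  induction l generalizing c with
  | nil => simp
  | cons x xs ih => simp [List.foldl_cons, ih, mul_assoc]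

-- invariant of A's reverse fold
theorem pvFold_inv (l : List Int) :
    l.foldr (fun x (st : List Int × Int) => (st.1 ++ [st.2], st.2 * x)) ([], 1)
      = ((pvStrides l).reverse, l.prod) := by
  induction l with
  | nil => simp [pvStrides]
  | cons a xs ih =>
    rw [List.foldr_cons, ih, pvStrides_cons]
    simp [pvFoldl_mul_eq_prod, mul_comm]

theorem pvA_eq (l : List Int) : calculate_stride_py l = calculate_stride_py_alt l := by
  by_cases h : l = []
  · simp [calculate_stride_py, calculate_stride_py_alt, h]
  · simp only [calculate_stride_py, calculate_stride_py_alt, if_neg h]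
    rw [List.foldl_reverse]
    have := pvFold_inv l
    simp only [this, List.reverse_reverse]
    rfl

-- ===== VERDICT (by name: the statement is the Claim_ definition above) =====
theorem calculate_stride_py_spec : Claim_equal_calculate_stride_py := by
  intro size _
  exact pvA_eq size
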